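-- pv_equiv track=rewrite | github.com/eunjineee/ODOA | PGS/121683.py | solution
-- ===== SOURCE A (Python) =====
-- def solution(string):
--     answer = []
--     ans_dict = {}
--     num = 0
--     while len(string) > 0:
--         if num >= len(string)-1:
--             if string[num] in ans_dict and string[0] not in answer:
--                 answer.append(string[num])
--             break
--
--         if string[num+1] != string[num]:
--             if string[num] in ans_dict:
--                 answer.append(string[num])
--             else:
--                 ans_dict[string[num]] = 1
--             string = string[num+1:]
--             num = 0
--         else:
--             num += 1
--     if len(answer) == 0:
--         return 'N'
--     else:
--         return ''.join(sorted(list(set(answer))))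
-- ===== SOURCE B (Python) =====
-- def solution(string):
--     # One pass: run-length compress while counting, per character, how many
--     # separate runs it has; answer = chars with >= 2 runs, sorted.
--     counts = {}
--     prev = None
--     for c in string:
--         if c != prev:
--             counts[c] = counts.get(c, 0) + 1
--             prev = c
--     res = sorted(c for c, n in counts.items() if n >= 2)
--     return ''.join(res) if res else 'N'
-- ===== Notes on version B (the rewrite author's own statement) =====
-- stated objective: faster
-- what changed: Replaced A's repeated string-slicing while-loop (each run boundary copies the remaining string) and its end-of-loop set/sort by a single left-to-right pass that counts runs per character in a dict, then filters counts >= 2 and sorts.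
import Mathlib
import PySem

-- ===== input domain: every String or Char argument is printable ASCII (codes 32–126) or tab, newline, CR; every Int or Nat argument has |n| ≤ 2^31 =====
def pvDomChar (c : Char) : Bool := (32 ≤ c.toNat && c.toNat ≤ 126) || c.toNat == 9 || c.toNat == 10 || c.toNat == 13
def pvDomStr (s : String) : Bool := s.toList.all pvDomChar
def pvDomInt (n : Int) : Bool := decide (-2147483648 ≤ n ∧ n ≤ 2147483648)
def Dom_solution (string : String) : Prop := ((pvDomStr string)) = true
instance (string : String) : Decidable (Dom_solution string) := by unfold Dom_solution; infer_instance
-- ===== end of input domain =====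

-- B replaces A's slice-and-restart while loop by one pass counting runs per char, then filter/sort (faster).

-- ===== PORT A =====
-- A's while loop: `string` is the current suffix (Python reassigns it by slicing), `num` the scan
-- index.  Every index A reads (num, num+1, 0) is provably in range on every reachable call
-- (0 ≤ num ≤ len-1 is an invariant of the loop), so `List.getD` is exact here.
def solutionLoop (s : List Char) (num : Nat) (answer : List Char)
    (ansDict : PySem.Dict Char Int) : List Char :=
  if 0 < s.length then
    if num ≥ s.length - 1 then
      if ansDict.contains (s.getD num 'A') && !(answer.contains (s.getD 0 'A')) then
        answer ++ [s.getD num 'A']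
      else answer
    else
      if s.getD (num + 1) 'A' ≠ s.getD num 'A' then
        if ansDict.contains (s.getD num 'A') then
          solutionLoop (s.drop (num + 1)) 0 (answer ++ [s.getD num 'A']) ansDict
        else
          solutionLoop (s.drop (num + 1)) 0 answer (ansDict.insert (s.getD num 'A') 1)
      else
        solutionLoop s (num + 1) answer ansDict
  else answer
termination_by s.length - num
decreasing_by
  · simp only [List.length_drop]; omega
  · simp only [List.length_drop]; omega
  · omega

def solution (string : String) : String :=
  let answer := solutionLoop string.toList 0 [] PySem.Dict.empty
  if answer.length == 0 then "N"
  else String.ofList (PySem.List.sorted (PySem.Set.ofList answer) (fun x => x) false)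

-- ===== PORT B =====
def solution_alt (string : String) : String :=
  let st := string.toList.foldl
    (fun (st : Option Char × PySem.Dict Char Int) c =>
      if st.1 = some c then st
      else (some c, st.2.insert c (st.2.getD c 0 + 1)))
    (none, PySem.Dict.empty)
  let res := PySem.List.sorted
    ((st.2.items.filter (fun p => decide (p.2 ≥ 2))).map Prod.fst) (fun x => x) false
  if res.isEmpty then "N" else String.ofList res

-- ===== PRECONDITION & SPEC =====
def Spec_solution (string : String) (out : String) : Prop := out = solution_alt string
instance (string : String) (out : String) : Decidable (Spec_solution string out) := by unfold Spec_solution; infer_instance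

-- ===== CLAIM (what is proved, stated in full; the proofs are below) =====
def Claim_equal_solution : Prop := ∀ (string : String), Dom_solution string → Spec_solution string (solution string)

-- ===== LEMMAS AND PROOFS =====

-- run-length compression of a char list (adjacent duplicates removed)
def goC (p : Char) : List Char → List Char
  | [] => []
  | c :: t => if c = p then goC p t else c :: goC c t

def compress : List Char → List Char
  | [] => []
  | c :: t => c :: goC c t

-- A's loop, re-expressed over the compressed run sequence
def runProc (r : List Char) (ans : List Char) (d : PySem.Dict Char Int) : List Char :=
  match r with
  | [] => ans
  | [c] => if d.contains c && !(ans.contains c) then ans ++ [c] else ans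
  | c :: c' :: t =>
      if d.contains c then runProc (c' :: t) (ans ++ [c]) d
      else runProc (c' :: t) ans (d.insert c 1)

theorem goC_replicate_append (k : Nat) (c : Char) (t : List Char) :
    goC c (List.replicate k c ++ t) = goC c t := by
  induction k with
  | zero => simp
  | succ n ih => simpa [goC, List.replicate_succ] using ih

theorem goC_eq_compress (c : Char) (t : List Char) (h : t.head? ≠ some c) :
    goC c t = compress t := by
  cases t with
  | nil => rfl
  | cons d t' =>
    simp only [List.head?_cons, ne_eq, Option.some.injEq] at h
    simp [goC, compress, h]

theorem compress_replicate_append (k : Nat) (c : Char) (t : List Char) :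
    compress (List.replicate (k + 1) c ++ t) = c :: goC c t := by
  simp [List.replicate_succ, compress, goC_replicate_append]

theorem solutionLoop_eq_runProc (t : List Char) (c : Char) (num : Nat)
    (ans : List Char) (d : PySem.Dict Char Int) :
    solutionLoop (List.replicate (num + 1) c ++ t) num ans d
      = runProc (compress (List.replicate (num + 1) c ++ t)) ans d := by
  induction t generalizing c num ans d with
  | nil =>
    rw [solutionLoop]
    have hlen : (List.replicate (num + 1) c ++ ([] : List Char)).length = num + 1 := by simp
    have hget : ∀ i, i < num + 1 → (List.replicate (num + 1) c ++ ([] : List Char)).getD i 'A' = c := by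
      intro i hi
      simp [List.getD_eq_getElem?_getD, hi]
    rw [hlen]
    simp only [compress_replicate_append, goC, runProc]
    rw [if_pos (by omega), if_pos (by omega), hget num (by omega), hget 0 (by omega)]
  | cons c' t'' ih =>
    have hget : ∀ i, i < num + 1 → (List.replicate (num + 1) c ++ (c' :: t'')).getD i 'A' = c := by
      intro i hi
      simp [List.getD_eq_getElem?_getD, List.getElem?_append_left, hi]
    have hget1 : (List.replicate (num + 1) c ++ (c' :: t'')).getD (num + 1) 'A' = c' := by
      simp [List.getD_eq_getElem?_getD]
    have hdrop : (List.replicate (num + 1) c ++ (c' :: t'')).drop (num + 1) = c' :: t'' := by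
      simp
    rw [solutionLoop]
    rw [if_pos (by simp), if_neg (by simp; omega), hget1, hget num (by omega)]
    by_cases hc : c' = c
    · rw [if_neg (by simp [hc])]
      have hs : List.replicate (num + 1) c ++ (c' :: t'') = List.replicate (num + 1 + 1) c ++ t'' := by
        subst hc
        rw [List.replicate_succ' (n := num + 1)]
        simp
      rw [hs]
      exact ih c (num + 1) ans d
    · rw [if_pos (by simp [hc])]
      have hcomp : compress (List.replicate (num + 1) c ++ (c' :: t'')) = c :: (c' :: goC c' t'') := by
        rw [compress_replicate_append, goC_eq_compress c (c' :: t'') (by simp [hc])]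
        rfl
      rw [hcomp, hdrop]
      have h1 : List.replicate (0 + 1) c' ++ t'' = c' :: t'' := by simp
      by_cases hd : d.contains c = true
      · rw [if_pos hd]
        have := ih c' 0 (ans ++ [c]) d
        rw [h1] at this
        rw [this]
        simp only [runProc, hd, if_true]
        rfl
      · rw [if_neg hd]
        have := ih c' 0 ans (d.insert c 1)
        rw [h1] at this
        rw [this]
        rw [show runProc (c :: c' :: goC c' t'') ans d
            = runProc (c' :: goC c' t'') ans (d.insert c 1) from by
          simp only [runProc, if_neg hd]]
        rfl

theorem mem_runProc (r ans : List Char) (d : PySem.Dict Char Int) (x : Char) :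
    x ∈ runProc r ans d ↔ x ∈ ans ∨ (x ∈ r ∧ (d.contains x = true ∨ 2 ≤ r.count x)) := by
  fun_induction runProc r ans d
  case case1 => simp
  case case2 ans d c h =>
    simp only [Bool.and_eq_true, Bool.not_eq_eq_eq_not, Bool.not_true] at h
    by_cases hx : x = c
    · subst hx; simp [h.1]
    · simp [hx]
  case case3 ans d c h =>
    rw [Bool.and_eq_true, not_and_or] at h
    by_cases hx : x = c
    · subst hx
      rcases h with h | h
      · simp [Bool.eq_false_iff.mpr h]
      · have hm : x ∈ ans := by simpa using h
        simp [hm]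
    · simp [hx]
  case case4 ans d c c' t h ih =>
    rw [ih]
    by_cases hx : x = c
    · subst hx; simp [h]
    · simp [hx, List.count_cons_of_ne (Ne.symm hx)]
  case case5 ans d c c' t h ih =>
    rw [ih, Bool.not_eq_true] at *
    by_cases hx : x = c
    · subst hx
      simp [PySem.Dict.contains_insert_self, h]
    · simp only [PySem.Dict.contains_insert, (by simpa using hx : (x == c) = false),
        Bool.false_or, List.mem_cons, hx, false_or, List.count_cons_of_ne (Ne.symm hx)] at *

theorem foldB_snd (s : List Char) (p : Char) (d : PySem.Dict Char Int) :
    (s.foldl (fun (st : Option Char × PySem.Dict Char Int) c =>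
        if st.1 = some c then st
        else (some c, st.2.insert c (st.2.getD c 0 + 1))) (some p, d)).2
      = (goC p s).foldl (fun d c => d.insert c (d.getD c 0 + 1)) d := by
  induction s generalizing p d with
  | nil => rfl
  | cons c t ih =>
    by_cases hc : c = p
    · subst hc
      simp only [List.foldl_cons, goC]
      exact ih c d
    · have hne : ¬ (some p = some c) := by simpa using fun h => hc h.symm
      simp only [List.foldl_cons, if_neg hne, goC, if_neg hc]
      exact ih c _

-- ===== VERDICT (by name: the statement is the Claim_ definition above) =====
theorem count_two_le_mem {x : Char} {l : List Char} (h : 2 ≤ l.count x) : x ∈ l :=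
  List.count_pos_iff.mp (by omega)

theorem solution_spec : Claim_equal_solution := by
  intro string _
  unfold Spec_solution solution solution_alt
  cases hs : string.toList with
  | nil =>
    dsimp only
    rw [solutionLoop]
    simp [PySem.Dict.empty, PySem.List.sorted]
  | cons c t =>
    have hA : solutionLoop (c :: t) 0 [] PySem.Dict.empty
        = runProc (compress (c :: t)) [] PySem.Dict.empty := by
      simpa using solutionLoop_eq_runProc t c 0 [] PySem.Dict.empty
    have memA : ∀ x, x ∈ solutionLoop (c :: t) 0 [] PySem.Dict.empty
        ↔ 2 ≤ (compress (c :: t)).count x := by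
      intro x
      rw [hA, mem_runProc]
      simp only [List.not_mem_nil, false_or, PySem.Dict.contains_empty, Bool.false_eq_true,
        false_or]
      exact ⟨fun h => h.2, fun h => ⟨count_two_le_mem h, h⟩⟩
    have hfold : ((c :: t).foldl
        (fun (st : Option Char × PySem.Dict Char Int) c =>
          if st.1 = some c then st
          else (some c, st.2.insert c (st.2.getD c 0 + 1)))
        (none, PySem.Dict.empty)).2 = PySem.Dict.counter (compress (c :: t)) := by
      rw [← PySem.Dict.foldl_insert_getD_add_one_eq_counter,
        show compress (c :: t) = c :: goC c t from rfl,
        List.foldl_cons, List.foldl_cons]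
      rw [if_neg (by simp)]
      exact foldB_snd t c _
    have hLB : (((PySem.Dict.counter (compress (c :: t))).items.filter
          (fun p => decide (p.2 ≥ 2))).map Prod.fst)
        = (PySem.Set.ofList (compress (c :: t))).filter
            (fun k => decide (2 ≤ (compress (c :: t)).count k)) := by
      rw [PySem.Dict.items_counter, List.filter_map, List.map_map]
      simp [Function.comp_def, ge_iff_le]
    have memB : ∀ x, x ∈ (PySem.Set.ofList (compress (c :: t))).filter
          (fun k => decide (2 ≤ (compress (c :: t)).count k))
        ↔ 2 ≤ (compress (c :: t)).count x := by
      intro x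
      rw [List.mem_filter, PySem.Set.mem_ofList]
      exact ⟨fun h => of_decide_eq_true h.2,
        fun h => ⟨count_two_le_mem h, decide_eq_true h⟩⟩
    dsimp only
    rw [hfold, hLB]
    have hperm : (PySem.Set.ofList
          (solutionLoop (c :: t) 0 [] PySem.Dict.empty)).Perm
        ((PySem.Set.ofList (compress (c :: t))).filter
          (fun k => decide (2 ≤ (compress (c :: t)).count k))) := by
      rw [List.perm_ext_iff_of_nodup (PySem.Set.nodup_ofList _)
        ((PySem.Set.nodup_ofList _).filter _)]
      intro x
      rw [PySem.Set.mem_ofList, memA x, memB x]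
    have hsorted : PySem.List.sorted
          (PySem.Set.ofList (solutionLoop (c :: t) 0 [] PySem.Dict.empty)) (fun x => x) false
        = PySem.List.sorted ((PySem.Set.ofList (compress (c :: t))).filter
            (fun k => decide (2 ≤ (compress (c :: t)).count k))) (fun x => x) false :=
      PySem.List.sorted_eq_sorted_of_perm _ _ _ (fun a b h => h) hperm
    by_cases ha : solutionLoop (c :: t) 0 [] PySem.Dict.empty = []
    · have hb : (PySem.Set.ofList (compress (c :: t))).filter
          (fun k => decide (2 ≤ (compress (c :: t)).count k)) = [] := by
        rw [List.eq_nil_iff_forall_not_mem]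
        intro x hx
        have := (memB x).mp hx
        have := (memA x).mpr this
        simp [ha] at this
      simp [ha, hb, PySem.List.sorted_eq_nil_iff]
    · have hb : ¬ (PySem.Set.ofList (compress (c :: t))).filter
          (fun k => decide (2 ≤ (compress (c :: t)).count k)) = [] := by
        intro h
        apply ha
        rw [List.eq_nil_iff_forall_not_mem]
        intro x hx
        have := (memB x).mpr ((memA x).mp hx)
        simp [h] at this
      rw [if_neg (by simpa using ha),
        if_neg (by simpa [List.isEmpty_iff, PySem.List.sorted_eq_nil_iff] using hb), hsorted]
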